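-- pv_equiv track=rewrite | github.com/LukaSchnauzer/anki-cards-generator_CN-ES | src/utils/normalize_pinyin_csv.py | add_tone_mark
-- ===== SOURCE A (Python) =====
-- TONE_MARKS = {
--     'a': ['ā', 'á', 'ǎ', 'à', 'a'],
--     'e': ['ē', 'é', 'ě', 'è', 'e'],
--     'i': ['ī', 'í', 'ǐ', 'ì', 'i'],
--     'o': ['ō', 'ó', 'ǒ', 'ò', 'o'],
--     'u': ['ū', 'ú', 'ǔ', 'ù', 'u'],
--     'ü': ['ǖ', 'ǘ', 'ǚ', 'ǜ', 'ü'],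
--     'v': ['ǖ', 'ǘ', 'ǚ', 'ǜ', 'ü'],  # v is sometimes used for ü
-- }
--
-- def add_tone_mark(syllable: str, tone: int) -> str:
--     """Add tone mark to a pinyin syllable.
--
--     Rules for tone mark placement:
--     1. If 'a' or 'e' exists, it takes the tone mark
--     2. If 'ou' exists, 'o' takes the tone mark
--     3. Otherwise, the last vowel takes the tone mark
--
--     Args:
--         syllable: Pinyin syllable without tone (e.g., 'lu', 'xing')
--         tone: Tone number (1-5, where 5 is neutral/no mark)
--
--     Returns:
--         Syllable with tone mark (e.g., 'lǚ', 'xíng')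
--     """
--     if tone < 1 or tone > 5:
--         return syllable
--
--     # Tone 5 (neutral) - no mark needed
--     if tone == 5:
--         return syllable
--
--     # Preserve original case
--     is_capitalized = syllable and syllable[0].isupper()
--     syllable_lower = syllable.lower()
--
--     # Convert 'v' to 'ü' for processing
--     syllable_lower = syllable_lower.replace('v', 'ü')
--
--     # Find which vowel gets the tone mark
--     # Rule 1: 'a' or 'e' takes precedence
--     if 'a' in syllable_lower:
--         vowel = 'a'
--         pos = syllable_lower.index('a')
--     elif 'e' in syllable_lower:
--         vowel = 'e'
--         pos = syllable_lower.index('e')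
--     # Rule 2: 'ou' - 'o' takes the mark
--     elif 'ou' in syllable_lower:
--         vowel = 'o'
--         pos = syllable_lower.index('o')
--     # Rule 3: Last vowel (including ü)
--     else:
--         # Find all vowels
--         vowels_in_syllable = []
--         for i, char in enumerate(syllable_lower):
--             if char in 'iouüv':
--                 vowels_in_syllable.append((i, char))
--
--         if vowels_in_syllable:
--             pos, vowel = vowels_in_syllable[-1]
--             if vowel == 'v':
--                 vowel = 'ü'
--         else:
--             # No vowel found, return as-is
--             return syllable
--
--     # Get the tone-marked version
--     if vowel in TONE_MARKS:
--         marked_vowel = TONE_MARKS[vowel][tone - 1]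
--         # Replace the vowel at position with marked version
--         result = syllable_lower[:pos] + marked_vowel + syllable_lower[pos + 1:]
--
--         # Restore capitalization if needed
--         if is_capitalized and result:
--             result = result[0].upper() + result[1:]
--
--         return result
--
--     return syllable
-- ===== SOURCE B (Python) =====
-- TONE_MARKS = {
--     'a': ['ā', 'á', 'ǎ', 'à', 'a'],
--     'e': ['ē', 'é', 'ě', 'è', 'e'],
--     'i': ['ī', 'í', 'ǐ', 'ì', 'i'],
--     'o': ['ō', 'ó', 'ǒ', 'ò', 'o'],
--     'u': ['ū', 'ú', 'ǔ', 'ù', 'u'],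
--     'ü': ['ǖ', 'ǘ', 'ǚ', 'ǜ', 'ü'],
--     'v': ['ǖ', 'ǘ', 'ǚ', 'ǜ', 'ü'],  # v is sometimes used for ü
-- }
--
-- def add_tone_mark(syllable: str, tone: int) -> str:
--     """Add tone mark to a pinyin syllable.
--
--     The placement rules (first 'a', else first 'e', else the first 'o' when
--     'ou' occurs, else the last vowel) are flattened into one numeric rank per
--     vowel occurrence, and the marked position is simply the candidate of
--     minimal rank.
--     """
--     if tone < 1 or tone > 4:
--         # out-of-range tones and the neutral tone 5 carry no mark
--         return syllable
--
--     low = syllable.lower().replace('v', 'ü')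
--     n = len(low)
--     saw_ou = any(low[i] == 'o' and low[i + 1] == 'u' for i in range(n - 1))
--
--     # Each candidate is (rank, position, vowel); smaller rank = higher priority.
--     # Band 0: any 'a' (earlier wins); band 1: any 'e'; band 2: any 'o' when the
--     # syllable contains 'ou'; band 3: any other vowel, later wins (n - 1 - i).
--     cands = []
--     for i, c in enumerate(low):
--         if c == 'a':
--             cands.append(((n + 1) * 0 + i, i, c))
--         elif c == 'e':
--             cands.append(((n + 1) * 1 + i, i, c))
--         elif c in 'iouü':
--             if c == 'o' and saw_ou:
--                 cands.append(((n + 1) * 2 + i, i, c))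
--             cands.append(((n + 1) * 3 + (n - 1 - i), i, c))
--     if not cands:
--         return syllable
--
--     _, pos, vowel = min(cands, key=lambda t: t[0])
--     out = low[:pos] + TONE_MARKS[vowel][tone - 1] + low[pos + 1:]
--     if syllable[:1].isupper():
--         out = out[0].upper() + out[1:]
--     return out
-- ===== Notes on version B (the rewrite author's own statement) =====
-- stated objective: alternative
-- what changed: B flattens A's branch cascade (first 'a', else first 'e', else the 'o' of an 'ou', else last vowel) into a single candidate-generation pass that assigns every vowel occurrence a numeric rank encoding rule priority and tie-breaking, then splices the mark at the minimal-rank candidate.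
import Mathlib
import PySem

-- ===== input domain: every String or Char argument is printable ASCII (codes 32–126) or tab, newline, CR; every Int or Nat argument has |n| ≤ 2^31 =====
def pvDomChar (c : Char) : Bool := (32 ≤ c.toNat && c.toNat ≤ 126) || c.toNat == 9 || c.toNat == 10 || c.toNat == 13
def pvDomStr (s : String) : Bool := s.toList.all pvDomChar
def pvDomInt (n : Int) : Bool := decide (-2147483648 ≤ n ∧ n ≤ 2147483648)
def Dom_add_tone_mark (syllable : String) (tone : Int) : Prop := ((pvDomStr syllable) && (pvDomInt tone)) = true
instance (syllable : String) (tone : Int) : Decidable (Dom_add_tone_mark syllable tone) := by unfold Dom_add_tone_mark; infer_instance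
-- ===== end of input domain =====

-- B replaces A's precedence cascade by one candidate-generation pass: every vowel occurrence gets a
-- numeric rank encoding the placement rules, and the marked position is the candidate of minimal rank
-- (objective: alternative).

-- Helpers shared by both ports: these lines are literally identical in Source A and Source B.
-- Python str.upper() on one character; exact on ASCII and on the pinyin vowels this program can produce
def pvUpperChar (c : Char) : Char :=
  if c = 'ü' then 'Ü' else
  if c = 'ā' then 'Ā' else if c = 'á' then 'Á' else if c = 'ǎ' then 'Ǎ' else if c = 'à' then 'À' else
  if c = 'ē' then 'Ē' else if c = 'é' then 'É' else if c = 'ě' then 'Ě' else if c = 'è' then 'È' else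
  if c = 'ī' then 'Ī' else if c = 'í' then 'Í' else if c = 'ǐ' then 'Ǐ' else if c = 'ì' then 'Ì' else
  if c = 'ō' then 'Ō' else if c = 'ó' then 'Ó' else if c = 'ǒ' then 'Ǒ' else if c = 'ò' then 'Ò' else
  if c = 'ū' then 'Ū' else if c = 'ú' then 'Ú' else if c = 'ǔ' then 'Ǔ' else if c = 'ù' then 'Ù' else
  if c = 'ǖ' then 'Ǖ' else if c = 'ǘ' then 'Ǘ' else if c = 'ǚ' then 'Ǚ' else if c = 'ǜ' then 'Ǜ' else
  PySem.Chars.upperChar c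

-- the module constant TONE_MARKS (1-character Python strings as Char)
def toneMarks : PySem.Dict Char (List Char) := PySem.Dict.ofList
  [('a', ['ā', 'á', 'ǎ', 'à', 'a']),
   ('e', ['ē', 'é', 'ě', 'è', 'e']),
   ('i', ['ī', 'í', 'ǐ', 'ì', 'i']),
   ('o', ['ō', 'ó', 'ǒ', 'ò', 'o']),
   ('u', ['ū', 'ú', 'ǔ', 'ù', 'u']),
   ('ü', ['ǖ', 'ǘ', 'ǚ', 'ǜ', 'ü']),
   ('v', ['ǖ', 'ǘ', 'ǚ', 'ǜ', 'ü'])]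

-- syllable.lower().replace('v', 'ü'): a replace with a 1-char pattern is exactly a per-character map
def pvLow (cs : List Char) : List Char :=
  (PySem.Chars.lower cs).map (fun c => if c = 'v' then 'ü' else c)

-- A: is_capitalized = syllable and syllable[0].isupper(); B: syllable[:1].isupper() — the same head test
def pvIsCap (cs : List Char) : Bool :=
  match cs with
  | [] => false
  | c :: _ => PySem.Chars.isupper c

-- if is_capitalized (A also tests 'and result'; result is nonempty there): result[0].upper() + result[1:]
def pvCap (isCap : Bool) (r : List Char) : List Char :=
  if isCap then (match r with | [] => r | c :: rest => pvUpperChar c :: rest) else r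

-- ===== PORT A =====
-- the for-loop collecting (i, char) for char in 'iouüv' ('char in <string>' for 1 char is membership)
def vowelsA (L : List Char) : List (Int × Char) :=
  (PySem.List.enumerate L 0).foldl
    (fun acc p => if ['i', 'o', 'u', 'ü', 'v'].contains p.2 then acc ++ [p] else acc) []

-- A's branch cascade choosing (pos, vowel); none = A's "no vowel found" early return
def selA (L : List Char) : Option (Int × Char) :=
  if L.contains 'a' then                            -- 'a' in s; s.index('a') (defined: 'a' present)
    (PySem.List.index? L 'a').map (fun n => ((n : Int), 'a'))
  else if L.contains 'e' then
    (PySem.List.index? L 'e').map (fun n => ((n : Int), 'e'))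
  else if PySem.Chars.isIn ['o', 'u'] L then        -- 'ou' in s
    (PySem.List.index? L 'o').map (fun n => ((n : Int), 'o'))
  else
    match PySem.List.pyGet? (vowelsA L) (-1) with   -- vowels_in_syllable[-1]
    | some (i, c) => some (i, if c = 'v' then 'ü' else c)
    | none => none

def add_tone_mark (syllable : String) (tone : Int) : String :=
  if tone < 1 ∨ tone > 5 then syllable
  else if tone = 5 then syllable
  else
    match selA (pvLow syllable.toList) with
    | none => syllable
    | some (pos, vowel) =>
      if toneMarks.contains vowel then
        match PySem.Dict.get? toneMarks vowel with
        | none => syllable                          -- unreachable (guarded by contains)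
        | some marks =>
          match PySem.List.pyGet? marks (tone - 1) with
          | none => syllable                        -- unreachable: 1 ≤ tone ≤ 4, len(marks) = 5
          | some m =>
            String.ofList (pvCap (pvIsCap syllable.toList)
              (PySem.List.slice (pvLow syllable.toList) none (some pos)
                ++ m :: PySem.List.slice (pvLow syllable.toList) (some (pos + 1)) none))
      else syllable

-- ===== PORT B =====
-- saw_ou = any(low[i] == 'o' and low[i+1] == 'u' for i in range(n - 1));
-- low[i] / low[i+1] are always in range there, so the pyGetD default is never read
def sawOU (L : List Char) : Bool :=
  (PySem.List.pyRange 0 ((L.length : Int) - 1) 1).any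
    (fun i => (PySem.List.pyGetD L i ' ' == 'o') && (PySem.List.pyGetD L (i + 1) ' ' == 'u'))

-- the candidate-building loop: each vowel occurrence contributes (rank, position, vowel) entries
def candsB (L : List Char) : List (Int × Int × Char) :=
  (PySem.List.enumerate L 0).foldl
    (fun acc p =>
      if p.2 = 'a' then acc ++ [(((L.length : Int) + 1) * 0 + p.1, p.1, p.2)]
      else if p.2 = 'e' then acc ++ [(((L.length : Int) + 1) * 1 + p.1, p.1, p.2)]
      else if ['i', 'o', 'u', 'ü'].contains p.2 then
        (if p.2 = 'o' && sawOU L then acc ++ [(((L.length : Int) + 1) * 2 + p.1, p.1, p.2)] else acc)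
          ++ [(((L.length : Int) + 1) * 3 + ((L.length : Int) - 1 - p.1), p.1, p.2)]
      else acc) []

def add_tone_mark_alt (syllable : String) (tone : Int) : String :=
  if tone < 1 ∨ tone > 4 then syllable
  else
    match PySem.List.min? (candsB (pvLow syllable.toList)) (fun t => t.1) with   -- min(cands, key=…)
    | none => syllable                              -- 'if not cands: return syllable'
    | some (_, pos, vowel) =>
      match PySem.Dict.get? toneMarks vowel with
      | none => syllable                            -- unreachable: vowel is always a TONE_MARKS key
      | some marks =>
        match PySem.List.pyGet? marks (tone - 1) with
        | none => syllable                          -- unreachable: 1 ≤ tone ≤ 4, len(marks) = 5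
        | some m =>
          String.ofList (pvCap (pvIsCap syllable.toList)
            (PySem.List.slice (pvLow syllable.toList) none (some pos)
              ++ m :: PySem.List.slice (pvLow syllable.toList) (some (pos + 1)) none))

-- ===== PRECONDITION & SPEC =====
def Spec_add_tone_mark (syllable : String) (tone : Int) (out : String) : Prop := out = add_tone_mark_alt syllable tone
instance (syllable : String) (tone : Int) (out : String) : Decidable (Spec_add_tone_mark syllable tone out) := by unfold Spec_add_tone_mark; infer_instance

-- ===== CLAIM (what is proved, stated in full; the proofs are below) =====
def Claim_equal_add_tone_mark : Prop := ∀ (syllable : String) (tone : Int), Dom_add_tone_mark syllable tone → Spec_add_tone_mark syllable tone (add_tone_mark syllable tone)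

-- ===== LEMMAS AND PROOFS =====

-- 'v' never survives pvLow
lemma v_not_mem_pvLow (cs : List Char) : 'v' ∉ pvLow cs := by
  unfold pvLow
  intro h
  rcases List.mem_map.mp h with ⟨c, _, hc⟩
  by_cases hv : c = 'v' <;> simp [hv] at hc

-- min?: a strictly minimal member is the result (specialised to Int keys)
lemma min?_foldl_aux {α : Type} (key : α → Int) (m : α) :
    ∀ (xs : List α) (z : α),
      (∀ y ∈ xs, y ≠ m → key m < key y) →
      (z = m ∨ (key m < key z ∧ m ∈ xs)) →
      List.foldl (fun acc x => match acc with
        | none => some x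
        | some w => if key x < key w then some x else some w) (some z) xs = some m := by
  intro xs
  induction xs with
  | nil =>
    intro z _ hz
    rcases hz with rfl | ⟨_, hmem⟩
    · rfl
    · exact absurd hmem (List.not_mem_nil)
  | cons x t ih =>
    intro z hlt hz
    rcases hz with rfl | ⟨hkz, hmem⟩
    · have hcond : ¬ key x < key z := by
        by_cases hx : x = z
        · subst hx; omega
        · have := hlt x (List.mem_cons_self) hx
          omega
      simp only [List.foldl_cons, if_neg hcond]
      exact ih z (fun y hy => hlt y (List.mem_cons_of_mem _ hy)) (Or.inl rfl)
    · by_cases hx : x = m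
      · subst hx
        have hcond : key x < key z := hkz
        simp only [List.foldl_cons, if_pos hcond]
        exact ih x (fun y hy => hlt y (List.mem_cons_of_mem _ hy)) (Or.inl rfl)
      · have hkx : key m < key x := hlt x (List.mem_cons_self) hx
        have hmem' : m ∈ t := by
          rcases List.mem_cons.mp hmem with h | h
          · exact absurd h.symm hx
          · exact h
        by_cases hcond : key x < key z
        · simp only [List.foldl_cons, if_pos hcond]
          exact ih x (fun y hy => hlt y (List.mem_cons_of_mem _ hy)) (Or.inr ⟨hkx, hmem'⟩)
        · simp only [List.foldl_cons, if_neg hcond]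
          exact ih z (fun y hy => hlt y (List.mem_cons_of_mem _ hy)) (Or.inr ⟨hkz, hmem'⟩)

lemma min?_eq_of_strict {α : Type} {key : α → Int} {xs : List α} {m : α}
    (hm : m ∈ xs) (hlt : ∀ y ∈ xs, y ≠ m → key m < key y) :
    PySem.List.min? xs key = some m := by
  cases xs with
  | nil => exact absurd hm (List.not_mem_nil)
  | cons x t =>
    unfold PySem.List.min?
    simp only [List.foldl_cons]
    by_cases hx : x = m
    · subst hx
      exact min?_foldl_aux key x t x (fun y hy => hlt y (List.mem_cons_of_mem _ hy)) (Or.inl rfl)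
    · have hkx : key m < key x := hlt x (List.mem_cons_self) hx
      have hmem' : m ∈ t := by
        rcases List.mem_cons.mp hm with h | h
        · exact absurd h.symm hx
        · exact h
      exact min?_foldl_aux key m t x (fun y hy => hlt y (List.mem_cons_of_mem _ hy)) (Or.inr ⟨hkx, hmem'⟩)

-- per-element candidate list: candsB is its flatMap over the enumeration
def fB (L : List Char) (i : Int) (c : Char) : List (Int × Int × Char) :=
  if c = 'a' then [(((L.length : Int) + 1) * 0 + i, i, c)]
  else if c = 'e' then [(((L.length : Int) + 1) * 1 + i, i, c)]
  else if ['i', 'o', 'u', 'ü'].contains c then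
    (if c = 'o' && sawOU L then [(((L.length : Int) + 1) * 2 + i, i, c)] else [])
      ++ [(((L.length : Int) + 1) * 3 + ((L.length : Int) - 1 - i), i, c)]
  else []

lemma candsB_eq (L : List Char) :
    candsB L = (PySem.List.enumerate L 0).flatMap (fun p => fB L p.1 p.2) := by
  unfold candsB
  have hstep : (fun (acc : List (Int × Int × Char)) (p : Int × Char) =>
      if p.2 = 'a' then acc ++ [(((L.length : Int) + 1) * 0 + p.1, p.1, p.2)]
      else if p.2 = 'e' then acc ++ [(((L.length : Int) + 1) * 1 + p.1, p.1, p.2)]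
      else if ['i', 'o', 'u', 'ü'].contains p.2 then
        (if p.2 = 'o' && sawOU L then acc ++ [(((L.length : Int) + 1) * 2 + p.1, p.1, p.2)] else acc)
          ++ [(((L.length : Int) + 1) * 3 + ((L.length : Int) - 1 - p.1), p.1, p.2)]
      else acc) = (fun acc p => acc ++ fB L p.1 p.2) := by
    funext acc p
    unfold fB
    split_ifs <;> simp
  rw [hstep, PySem.List.foldl_append_eq_flatMap]
  simp

lemma mem_candsB_iff {L : List Char} {q : Int × Int × Char} :
    q ∈ candsB L ↔ ∃ k, ∃ (hk : k < L.length), q ∈ fB L (k : Int) L[k] := by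
  rw [candsB_eq, List.mem_flatMap]
  constructor
  · rintro ⟨p, hp, hq⟩
    rcases (PySem.List.mem_enumerate_iff _ _ _).mp hp with ⟨k, hk, rfl⟩
    exact ⟨k, hk, by simpa using hq⟩
  · rintro ⟨k, hk, hq⟩
    exact ⟨((k : Int), L[k]), (PySem.List.mem_enumerate_iff _ _ _).mpr ⟨k, hk, by simp⟩, by simpa using hq⟩

-- sawOU really is the 'ou' substring test
lemma sawOU_iff_exists (L : List Char) :
    sawOU L = true ↔ ∃ k, ∃ (h : k + 1 < L.length), L[k] = 'o' ∧ L[k + 1] = 'u' := by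
  unfold sawOU
  rw [List.any_eq_true]
  constructor
  · rintro ⟨i, hi, hpred⟩
    rcases PySem.List.mem_pyRange_one.mp hi with ⟨h0, hlt⟩
    refine ⟨i.toNat, by omega, ?_, ?_⟩
    · have h := (Bool.and_eq_true _ _).mp hpred |>.1
      have hcast : i = ((i.toNat : ℕ) : Int) := by omega
      rw [hcast, PySem.List.pyGetD_natCast, List.getD_eq_getElem _ _ (by omega)] at h
      simpa using h
    · have h := (Bool.and_eq_true _ _).mp hpred |>.2
      have hcast : i + 1 = ((i.toNat + 1 : ℕ) : Int) := by omega
      rw [hcast, PySem.List.pyGetD_natCast, List.getD_eq_getElem _ _ (by omega)] at h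
      simpa using h
  · rintro ⟨k, hk, ho, hu⟩
    refine ⟨(k : Int), PySem.List.mem_pyRange_one.mpr ⟨by omega, by omega⟩, ?_⟩
    rw [Bool.and_eq_true]
    constructor
    · rw [PySem.List.pyGetD_natCast, List.getD_eq_getElem _ _ (by omega)]
      simpa using ho
    · have hcast : ((k : Int) + 1) = ((k + 1 : ℕ) : Int) := by push_cast; ring
      rw [hcast, PySem.List.pyGetD_natCast, List.getD_eq_getElem _ _ (by omega)]
      simpa using hu

lemma isIn_ou_iff_exists (L : List Char) :
    PySem.Chars.isIn ['o', 'u'] L = true ↔ ∃ k, ∃ (h : k + 1 < L.length), L[k] = 'o' ∧ L[k + 1] = 'u' := by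
  rw [PySem.Chars.isIn_iff_infix]
  constructor
  · rintro ⟨s, t, heq⟩
    subst heq
    refine ⟨s.length, by simp [List.length_append], ?_, ?_⟩
    · simp
    · simp
  · rintro ⟨k, hk, ho, hu⟩
    refine ⟨L.take k, L.drop (k + 2), ?_⟩
    have h1 : L.drop k = 'o' :: 'u' :: L.drop (k + 2) := by
      rw [List.drop_eq_getElem_cons (by omega : k < L.length),
          List.drop_eq_getElem_cons (by omega : k + 1 < L.length), ho, hu]
    calc L.take k ++ ['o', 'u'] ++ L.drop (k + 2)
        = L.take k ++ L.drop k := by rw [h1]; simp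
      _ = L := List.take_append_drop k L

-- the case analysis of a candidate (what candsB can contain)
lemma candsB_cases {L : List Char} {y : Int × Int × Char} (hy : y ∈ candsB L) :
    ∃ k, ∃ (hk : k < L.length),
      (L[k] = 'a' ∧ y = (((L.length : Int) + 1) * 0 + k, (k : Int), 'a')) ∨
      (L[k] = 'e' ∧ y = (((L.length : Int) + 1) * 1 + k, (k : Int), 'e')) ∨
      (L[k] = 'o' ∧ sawOU L = true ∧ y = (((L.length : Int) + 1) * 2 + k, (k : Int), 'o')) ∨
      (['i', 'o', 'u', 'ü'].contains L[k] = true ∧ L[k] ≠ 'a' ∧ L[k] ≠ 'e' ∧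
        y = (((L.length : Int) + 1) * 3 + ((L.length : Int) - 1 - k), (k : Int), L[k])) := by
  rcases mem_candsB_iff.mp hy with ⟨k, hk, hq⟩
  refine ⟨k, hk, ?_⟩
  unfold fB at hq
  by_cases h1 : L[k] = 'a'
  · rw [if_pos h1] at hq
    simp at hq
    exact Or.inl ⟨h1, by rw [hq, h1]; simp⟩
  · rw [if_neg h1] at hq
    by_cases h2 : L[k] = 'e'
    · rw [if_pos h2] at hq
      simp at hq
      exact Or.inr (Or.inl ⟨h2, by rw [hq, h2]; simp⟩)
    · rw [if_neg h2] at hq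
      by_cases h3 : (['i', 'o', 'u', 'ü'].contains L[k]) = true
      · rw [if_pos h3] at hq
        rcases List.mem_append.mp hq with hl | hr
        · by_cases h4 : (L[k] = 'o' && sawOU L) = true
          · rw [if_pos h4] at hl
            simp at hl
            rcases Bool.and_eq_true _ _ |>.mp h4 with ⟨h5, h6⟩
            have h5' : L[k] = 'o' := by simpa using h5
            exact Or.inr (Or.inr (Or.inl ⟨h5', h6, by rw [hl, h5']⟩))
          · rw [if_neg h4] at hl
            exact absurd hl (List.not_mem_nil)
        · simp at hr
          exact Or.inr (Or.inr (Or.inr ⟨h3, h1, h2, by rw [hr]⟩))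
      · rw [if_neg h3] at hq
        exact absurd hq (List.not_mem_nil)

-- membership introduction for each band
lemma mem_candsB_a {L : List Char} {k : ℕ} (hk : k < L.length) (h : L[k] = 'a') :
    (((L.length : Int) + 1) * 0 + (k : Int), (k : Int), 'a') ∈ candsB L := by
  apply mem_candsB_iff.mpr ⟨k, hk, ?_⟩
  unfold fB
  simp [h]

lemma mem_candsB_e {L : List Char} {k : ℕ} (hk : k < L.length) (h : L[k] = 'e') :
    (((L.length : Int) + 1) * 1 + (k : Int), (k : Int), 'e') ∈ candsB L := by
  apply mem_candsB_iff.mpr ⟨k, hk, ?_⟩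
  unfold fB
  simp [h]

lemma mem_candsB_o {L : List Char} {k : ℕ} (hk : k < L.length) (h : L[k] = 'o')
    (hou : sawOU L = true) :
    (((L.length : Int) + 1) * 2 + (k : Int), (k : Int), 'o') ∈ candsB L := by
  apply mem_candsB_iff.mpr ⟨k, hk, ?_⟩
  unfold fB
  simp [h, hou]

lemma mem_candsB_band3 {L : List Char} {k : ℕ} (hk : k < L.length)
    (h : (['i', 'o', 'u', 'ü'].contains L[k]) = true) (h1 : L[k] ≠ 'a') (h2 : L[k] ≠ 'e') :
    (((L.length : Int) + 1) * 3 + ((L.length : Int) - 1 - k), (k : Int), L[k]) ∈ candsB L := by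
  apply mem_candsB_iff.mpr ⟨k, hk, ?_⟩
  unfold fB
  rw [if_neg (by simpa using h1), if_neg (by simpa using h2), if_pos h]
  simp

-- A's rule-3 collection, as a filter, its ordering and its membership
lemma vowelsA_eq_filter (L : List Char) :
    vowelsA L = (PySem.List.enumerate L 0).filter (fun p => ['i', 'o', 'u', 'ü', 'v'].contains p.2) := by
  unfold vowelsA
  have hfold := PySem.List.foldl_append_if (fun q : Int × Char => ['i', 'o', 'u', 'ü', 'v'].contains q.2)
    (fun x => x) (PySem.List.enumerate L 0) []
  simpa using hfold

lemma mem_vowelsA_iff {L : List Char} {p : Int × Char} :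
    p ∈ vowelsA L ↔ ∃ k, ∃ (hk : k < L.length),
      p = ((k : Int), L[k]) ∧ (['i', 'o', 'u', 'ü', 'v'].contains L[k]) = true := by
  rw [vowelsA_eq_filter, List.mem_filter]
  constructor
  · rintro ⟨hmem, hpred⟩
    rcases (PySem.List.mem_enumerate_iff _ _ _).mp hmem with ⟨k, hk, rfl⟩
    exact ⟨k, hk, by simp, by simpa using hpred⟩
  · rintro ⟨k, hk, rfl, hpred⟩
    exact ⟨(PySem.List.mem_enumerate_iff _ _ _).mpr ⟨k, hk, by simp⟩, by simpa using hpred⟩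

lemma pairwise_vowelsA (L : List Char) : (vowelsA L).Pairwise (fun p q => p.1 < q.1) := by
  rw [vowelsA_eq_filter]
  apply List.Pairwise.filter
  have h := PySem.List.pairwise_lt_pyRange_one 0 (0 + (L.length : Int))
  rw [← PySem.List.map_fst_enumerate L 0] at h
  exact List.pairwise_map.mp h

lemma last_max {l : List (Int × Char)} (hp : l.Pairwise (fun p q => p.1 < q.1)) {q : Int × Char}
    (hq : l.getLast? = some q) : ∀ p ∈ l, p.1 ≤ q.1 := by
  induction l with
  | nil => simp at hq
  | cons x t ih =>
    cases t with
    | nil =>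
      intro p hp'
      simp at hq hp'
      rw [hp', hq]
    | cons y t' =>
      rw [List.getLast?_cons_cons] at hq
      intro p hmem
      rcases List.mem_cons.mp hmem with rfl | hmem'
      · have hq' : q ∈ y :: t' := List.mem_of_getLast? hq
        have := (List.pairwise_cons.mp hp).1 q hq'
        omega
      · exact ih (List.pairwise_cons.mp hp).2 hq p hmem'

-- the heart of the proof: the minimal-rank candidate is exactly A's cascaded choice
lemma sel_agree {L : List Char} (hv : 'v' ∉ L) :
    (PySem.List.min? (candsB L) (fun t => t.1)).map (fun t => t.2) = selA L := by
  unfold selA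
  by_cases ha : L.contains 'a' = true
  · rw [if_pos ha]
    have hamem : 'a' ∈ L := by simpa using ha
    obtain ⟨ia, hia⟩ := Option.isSome_iff_exists.mp ((PySem.List.index?_isSome_iff L 'a').mpr hamem)
    obtain ⟨hklt, hgetA, hfirst⟩ := PySem.List.getElem_of_index?_eq_some hia
    have hmin : PySem.List.min? (candsB L) (fun t => t.1)
        = some (((L.length : Int) + 1) * 0 + (ia : Int), (ia : Int), 'a') := by
      apply min?_eq_of_strict (mem_candsB_a hklt hgetA)
      intro y hy hne
      rcases candsB_cases hy with ⟨k, hk, hc⟩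
      rcases hc with ⟨hck, rfl⟩ | ⟨hck, rfl⟩ | ⟨hck, hsw, rfl⟩ | ⟨hck, hna, hne2, rfl⟩
      · have hkne : k ≠ ia := by
          intro h; subst h; exact hne rfl
        have hle : ia ≤ k := by
          by_contra hlt2
          exact hfirst k (by omega) hck
        dsimp only
        omega
      · dsimp only; omega
      · dsimp only; omega
      · dsimp only; omega
    rw [hmin, hia]
    simp
  · rw [if_neg ha]
    have hana : 'a' ∉ L := by simpa using ha
    by_cases he : L.contains 'e' = true
    · rw [if_pos he]
      have hemem : 'e' ∈ L := by simpa using he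
      obtain ⟨ie, hie⟩ := Option.isSome_iff_exists.mp ((PySem.List.index?_isSome_iff L 'e').mpr hemem)
      obtain ⟨hklt, hgetE, hfirst⟩ := PySem.List.getElem_of_index?_eq_some hie
      have hmin : PySem.List.min? (candsB L) (fun t => t.1)
          = some (((L.length : Int) + 1) * 1 + (ie : Int), (ie : Int), 'e') := by
        apply min?_eq_of_strict (mem_candsB_e hklt hgetE)
        intro y hy hne
        rcases candsB_cases hy with ⟨k, hk, hc⟩
        rcases hc with ⟨hck, rfl⟩ | ⟨hck, rfl⟩ | ⟨hck, hsw, rfl⟩ | ⟨hck, hna, hne2, rfl⟩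
        · exact absurd (hck ▸ List.getElem_mem hk) hana
        · have hkne : k ≠ ie := by
            intro h; subst h; exact hne rfl
          have hle : ie ≤ k := by
            by_contra hlt2
            exact hfirst k (by omega) hck
          dsimp only
          omega
        · dsimp only; omega
        · dsimp only; omega
      rw [hmin, hie]
      simp
    · rw [if_neg he]
      have hene : 'e' ∉ L := by simpa using he
      by_cases hou : PySem.Chars.isIn ['o', 'u'] L = true
      · rw [if_pos hou]
        obtain ⟨k0, hk0, ho0, hu0⟩ := (isIn_ou_iff_exists L).mp hou
        have homem : 'o' ∈ L := ho0 ▸ List.getElem_mem (by omega)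
        have hsawOU : sawOU L = true := (sawOU_iff_exists L).mpr ⟨k0, hk0, ho0, hu0⟩
        obtain ⟨io, hio⟩ := Option.isSome_iff_exists.mp ((PySem.List.index?_isSome_iff L 'o').mpr homem)
        obtain ⟨hklt, hgetO, hfirst⟩ := PySem.List.getElem_of_index?_eq_some hio
        have hmin : PySem.List.min? (candsB L) (fun t => t.1)
            = some (((L.length : Int) + 1) * 2 + (io : Int), (io : Int), 'o') := by
          apply min?_eq_of_strict (mem_candsB_o hklt hgetO hsawOU)
          intro y hy hne
          rcases candsB_cases hy with ⟨k, hk, hc⟩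
          rcases hc with ⟨hck, rfl⟩ | ⟨hck, rfl⟩ | ⟨hck, hsw, rfl⟩ | ⟨hck, hna, hne2, rfl⟩
          · exact absurd (hck ▸ List.getElem_mem hk) hana
          · exact absurd (hck ▸ List.getElem_mem hk) hene
          · have hkne : k ≠ io := by
              intro h; subst h; exact hne rfl
            have hle : io ≤ k := by
              by_contra hlt2
              exact hfirst k (by omega) hck
            dsimp only
            omega
          · dsimp only; omega
        rw [hmin, hio]
        simp
      · rw [if_neg hou]
        have hsw : sawOU L = false := by
          rw [Bool.eq_false_iff]
          intro h
          exact hou ((isIn_ou_iff_exists L).mpr ((sawOU_iff_exists L).mp h))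
        simp only [PySem.List.pyGet?_neg_one]
        cases hlast : (vowelsA L).getLast? with
        | none =>
          have hveq : vowelsA L = [] := by
            cases hvl : vowelsA L with
            | nil => rfl
            | cons x t => rw [hvl] at hlast; simp at hlast
          have hcand : candsB L = [] := by
            rw [List.eq_nil_iff_forall_not_mem]
            intro y hy
            rcases candsB_cases hy with ⟨k, hk, hc⟩
            rcases hc with ⟨hck, _⟩ | ⟨hck, _⟩ | ⟨hck, hswk, _⟩ | ⟨hck, _, _, _⟩
            · exact absurd (hck ▸ List.getElem_mem hk) hana
            · exact absurd (hck ▸ List.getElem_mem hk) hene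
            · rw [hsw] at hswk; simp at hswk
            · have hmem4 : L[k] = 'i' ∨ L[k] = 'o' ∨ L[k] = 'u' ∨ L[k] = 'ü' := by simpa using hck
              have hmem5 : (['i', 'o', 'u', 'ü', 'v'].contains L[k]) = true := by
                rcases hmem4 with h | h | h | h <;> simp [h]
              have : ((k : Int), L[k]) ∈ vowelsA L := mem_vowelsA_iff.mpr ⟨k, hk, rfl, hmem5⟩
              rw [hveq] at this
              exact absurd this (List.not_mem_nil)
          rw [hcand]
          simp [PySem.List.min?]
        | some p =>
          obtain ⟨ipos, c⟩ := p
          have hpin : (ipos, c) ∈ vowelsA L := List.mem_of_getLast? hlast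
          rcases mem_vowelsA_iff.mp hpin with ⟨klast, hklast, heqp, hcont5⟩
          have hipos : ipos = (klast : Int) := congrArg Prod.fst heqp
          have hcchar : c = L[klast] := congrArg Prod.snd heqp
          have hcv : c ≠ 'v' := by
            intro h
            exact hv ((h ▸ hcchar) ▸ List.getElem_mem hklast)
          have hcna : L[klast] ≠ 'a' := by
            intro h; exact hana (h ▸ List.getElem_mem hklast)
          have hcne : L[klast] ≠ 'e' := by
            intro h; exact hene (h ▸ List.getElem_mem hklast)
          have hcont4 : (['i', 'o', 'u', 'ü'].contains L[klast]) = true := by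
            have h5 : L[klast] = 'i' ∨ L[klast] = 'o' ∨ L[klast] = 'u' ∨ L[klast] = 'ü' ∨ L[klast] = 'v' := by
              simpa using hcont5
            have hkv : L[klast] ≠ 'v' := hcchar ▸ hcv
            rcases h5 with h | h | h | h | h
            · simp [h]
            · simp [h]
            · simp [h]
            · simp [h]
            · exact absurd h hkv
          have hmin : PySem.List.min? (candsB L) (fun t => t.1)
              = some (((L.length : Int) + 1) * 3 + ((L.length : Int) - 1 - (klast : Int)),
                      (klast : Int), L[klast]) := by
            apply min?_eq_of_strict (mem_candsB_band3 hklast hcont4 hcna hcne)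
            intro y hy hne
            rcases candsB_cases hy with ⟨k, hk, hc⟩
            rcases hc with ⟨hck, rfl⟩ | ⟨hck, rfl⟩ | ⟨hck, hswk, rfl⟩ | ⟨hck, hna, hne2, rfl⟩
            · exact absurd (hck ▸ List.getElem_mem hk) hana
            · exact absurd (hck ▸ List.getElem_mem hk) hene
            · rw [hsw] at hswk; simp at hswk
            · have hmem4 : L[k] = 'i' ∨ L[k] = 'o' ∨ L[k] = 'u' ∨ L[k] = 'ü' := by simpa using hck
              have hmem5 : (['i', 'o', 'u', 'ü', 'v'].contains L[k]) = true := by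
                rcases hmem4 with h | h | h | h <;> simp [h]
              have hkvA : ((k : Int), L[k]) ∈ vowelsA L := mem_vowelsA_iff.mpr ⟨k, hk, rfl, hmem5⟩
              have hle : ((k : Int), L[k]).1 ≤ (ipos, c).1 := last_max (pairwise_vowelsA L) hlast _ hkvA
              dsimp only at hle
              rw [hipos] at hle
              have hkne : k ≠ klast := by
                intro h
                subst h
                exact hne rfl
              have hklt2 : (k : Int) < (klast : Int) := by
                have : k ≤ klast := by exact_mod_cast hle
                omega
              dsimp only
              omega
          rw [hmin]
          have hkv : L[klast] ≠ 'v' := hcchar ▸ hcv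
          simp [hkv, hipos, hcchar]

-- ===== VERDICT helpers done; the theorem =====
set_option maxHeartbeats 1000000 in
theorem add_tone_mark_spec : Claim_equal_add_tone_mark := by
  intro syllable tone _
  unfold Spec_add_tone_mark add_tone_mark add_tone_mark_alt
  by_cases hb : tone < 1 ∨ tone > 4
  · rw [if_pos hb]
    rcases hb with h | h
    · rw [if_pos (Or.inl h)]
    · by_cases h5 : tone = 5
      · rw [if_neg (by omega), if_pos h5]
      · rw [if_pos (Or.inr (by omega))]
  · rw [if_neg hb, if_neg (by omega : ¬ (tone < 1 ∨ tone > 5)), if_neg (by omega : ¬ tone = 5)]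
    have hsel := sel_agree (v_not_mem_pvLow syllable.toList)
    cases hmin : PySem.List.min? (candsB (pvLow syllable.toList)) (fun t => t.1) with
    | none =>
      rw [hmin] at hsel
      simp only [Option.map_none] at hsel
      rw [← hsel]
    | some t =>
      obtain ⟨r, pos, vowel⟩ := t
      rw [hmin] at hsel
      simp only [Option.map_some] at hsel
      rw [← hsel]
      have hm := PySem.List.min?_mem hmin
      rcases candsB_cases hm with ⟨k, hk, hc⟩
      have hvow : vowel = 'a' ∨ vowel = 'e' ∨ vowel = 'i' ∨ vowel = 'o' ∨ vowel = 'u' ∨ vowel = 'ü' := by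
        rcases hc with ⟨_, heq⟩ | ⟨_, heq⟩ | ⟨_, _, heq⟩ | ⟨hck, _, _, heq⟩
        · have h := congrArg (fun t => t.2.2) heq
          dsimp at h
          tauto
        · have h := congrArg (fun t => t.2.2) heq
          dsimp at h
          tauto
        · have h := congrArg (fun t => t.2.2) heq
          dsimp at h
          tauto
        · have h := congrArg (fun t => t.2.2) heq
          dsimp at h
          have h4' : (pvLow syllable.toList)[k] = 'i' ∨ (pvLow syllable.toList)[k] = 'o' ∨
              (pvLow syllable.toList)[k] = 'u' ∨ (pvLow syllable.toList)[k] = 'ü' := by simpa using hck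
          rw [h]
          tauto
      rcases hvow with rfl | rfl | rfl | rfl | rfl | rfl <;> rfl
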